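-- pv_equiv track=rewrite | github.com/TheEyeboy/functions | functions/my_functions.py | square_concatenate_digit
-- ===== SOURCE A (Python) =====
-- def square_concatenate_digit(number):
--
--     """Calculates the square of each digit in a number and returns them concatenated with hyphens.
--
--     Args:
--       number: The input integer.
--
--     Returns:
--         A string containing the squares of each digit in the number separated by hyphens.
--     """
--     square_number = []
--
--     while number > 0:
--         #Extract the last digits
--         last_digits = number % 10
--         squared_digit = last_digits * last_digits
--
--         #Convert integer to string
--         square_number.append(str(squared_digit))
--
--         number //= 10
--
--     concatenated_string = "-".join(square_number[::-1])
--     return concatenated_string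
-- ===== SOURCE B (Python) =====
-- def square_concatenate_digit(number):
--     if number <= 0:
--         return ""
--     return "-".join(str(int(d) ** 2) for d in str(number))
-- ===== Notes on version B (the rewrite author's own statement) =====
-- stated objective: idiomatic
-- what changed: Replaced the reverse arithmetic digit-extraction loop (mod/floordiv with a list reversed at the end) by direct traversal of the decimal string, squaring each digit character and joining with hyphens.
import Mathlib
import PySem

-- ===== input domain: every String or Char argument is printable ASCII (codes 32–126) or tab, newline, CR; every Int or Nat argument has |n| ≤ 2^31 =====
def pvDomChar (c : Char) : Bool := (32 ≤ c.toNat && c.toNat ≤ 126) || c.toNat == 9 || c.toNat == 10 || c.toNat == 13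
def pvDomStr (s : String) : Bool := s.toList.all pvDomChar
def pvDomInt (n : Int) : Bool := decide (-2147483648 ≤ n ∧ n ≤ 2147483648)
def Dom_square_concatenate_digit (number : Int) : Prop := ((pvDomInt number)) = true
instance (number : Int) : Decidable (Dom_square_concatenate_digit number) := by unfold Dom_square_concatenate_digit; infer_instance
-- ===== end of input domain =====

-- B replaces A's reverse arithmetic digit-extraction loop (mod/floordiv, list reversed at the
-- end) by direct traversal of the decimal string, squaring each digit and joining with hyphens
-- (objective: idiomatic; same cost).

-- ===== PORT A =====
-- the 'while number > 0' loop, accumulating str(d*d) for each extracted last digit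
def sqLoopA (n : Int) (acc : List String) : List String :=
  if 0 < n then
    sqLoopA (PySem.Int.floordiv n 10)
      (acc ++ [PySem.Int.toStr (PySem.Int.mod n 10 * PySem.Int.mod n 10)])
  else acc
termination_by n.toNat
decreasing_by
  rename_i h
  rw [PySem.Int.floordiv_eq_ediv_of_pos (by norm_num)]
  omega

def square_concatenate_digit (number : Int) : String :=
  PySem.Str.join "-" ((PySem.List.slice? (sqLoopA number []) none none (-1)).getD [])

-- ===== PORT B =====
def square_concatenate_digit_alt (number : Int) : String :=
  if number ≤ 0 then ""
  else
    PySem.Str.join "-"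
      ((PySem.Int.toStr number).toList.map
        (fun d => PySem.Int.toStr (((PySem.Int.ofChars? [d]).getD 0) ^ 2)))

-- ===== PRECONDITION & SPEC =====
def Spec_square_concatenate_digit (number : Int) (out : String) : Prop := out = square_concatenate_digit_alt number
instance (number : Int) (out : String) : Decidable (Spec_square_concatenate_digit number out) := by unfold Spec_square_concatenate_digit; infer_instance

-- ===== CLAIM (what is proved, stated in full; the proofs are below) =====
def Claim_equal_square_concatenate_digit : Prop := ∀ (number : Int), Dom_square_concatenate_digit number → Spec_square_concatenate_digit number (square_concatenate_digit number)

-- ===== LEMMAS AND PROOFS =====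

-- the string of each extracted square, LSB first
def pvSq (d : Nat) : String := PySem.Int.toStr ((d : Int) * (d : Int))

lemma sqLoopA_eq (m : Nat) : ∀ acc : List String,
    sqLoopA (m : Int) acc = acc ++ (Nat.digits 10 m).map pvSq := by
  induction m using Nat.strong_induction_on with
  | _ m ih =>
    intro acc
    rcases Nat.eq_zero_or_pos m with h0 | h0
    · subst h0
      rw [sqLoopA]
      simp
    · rw [sqLoopA]
      have hpos : (0 : Int) < (m : Int) := by exact_mod_cast h0
      rw [if_pos hpos]
      have h10 : ((10 : Int)) = ((10 : Nat) : Int) := by norm_num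
      rw [h10, PySem.Int.floordiv_natCast, PySem.Int.mod_natCast]
      rw [ih (m / 10) (Nat.div_lt_self h0 (by norm_num))]
      rw [Nat.digits_def' (by norm_num : (1:Nat) < 10) h0]
      simp [pvSq]

lemma toDigitsCore_eq (f : Nat) : ∀ (n : Nat) (ds : List Char), 0 < n → n ≤ f →
    Nat.toDigitsCore 10 f n ds = ((Nat.digits 10 n).map Nat.digitChar).reverse ++ ds := by
  induction f with
  | zero => intro n ds h1 h2; omega
  | succ f ih =>
    intro n ds h1 h2
    rw [Nat.toDigitsCore]
    by_cases h : n / 10 = 0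
    · have hn : n < 10 := by omega
      rw [if_pos h, Nat.digits_def' (by norm_num : (1:Nat) < 10) h1, h]
      simp [Nat.mod_eq_of_lt hn]
    · rw [if_neg h, ih (n / 10) _ (Nat.pos_of_ne_zero h) (by omega)]
      rw [Nat.digits_def' (by norm_num : (1:Nat) < 10) h1]
      simp

lemma toDigits_eq (m : Nat) (h : 0 < m) :
    Nat.toDigits 10 m = ((Nat.digits 10 m).map Nat.digitChar).reverse := by
  rw [Nat.toDigits, toDigitsCore_eq (m + 1) m [] h (by omega)]
  simp

lemma ofChars_digitChar (d : Nat) (hd : d < 10) :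
    (PySem.Int.ofChars? [Nat.digitChar d]).getD 0 = (d : Int) := by
  interval_cases d <;> decide

theorem square_concatenate_digit_spec : Claim_equal_square_concatenate_digit := by
  unfold Claim_equal_square_concatenate_digit
  intro number _
  unfold Spec_square_concatenate_digit square_concatenate_digit square_concatenate_digit_alt
  rcases le_or_gt number 0 with hle | hgt
  · rw [if_pos hle, sqLoopA, if_neg (by omega)]
    rfl
  · rw [if_neg (by omega)]
    obtain ⟨m, rfl⟩ : ∃ m : Nat, number = (m : Int) :=
      ⟨number.toNat, (Int.toNat_of_nonneg (by omega)).symm⟩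
    have hm : 0 < m := by exact_mod_cast hgt
    rw [sqLoopA_eq m [], PySem.List.slice?_none_none_neg_one]
    have htos : (PySem.Int.toStr (m : Int)).toList = Nat.toDigits 10 m := by
      rw [PySem.Int.toList_toStr, PySem.Int.toChars]
      rw [if_neg (by omega)]
      simp
    rw [htos, toDigits_eq m hm]
    simp only [Option.getD_some, List.nil_append, List.map_reverse, List.map_map]
    have hmap : List.map ((fun d => PySem.Int.toStr ((PySem.Int.ofChars? [d]).getD 0 ^ 2)) ∘
        Nat.digitChar) (Nat.digits 10 m) = List.map pvSq (Nat.digits 10 m) := by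
      apply List.map_congr_left
      intro d hd
      have hlt : d < 10 := Nat.digits_lt_base (by norm_num) hd
      simp [Function.comp, ofChars_digitChar d hlt, pvSq, pow_two]
    rw [hmap]
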